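-- pv_equiv track=rewrite | github.com/joyceycodes/CodeWars | Python/6kyu/consonant_value.py | solve
-- ===== SOURCE A (Python) =====
-- def solve(s):
--     # loop over s
--     # add to value until we get to a value
--     # update max_value only when it's a new high
--     max_value = 0
--     value = 0
--     for i in s:
--         if i not in 'aeiou':
--             value += ord(i)-96
--         else:
--             max_value = max(value, max_value)
--             value = 0
--     return max(value, max_value)
-- ===== SOURCE B (Python) =====
-- def solve(s):
--     # Two-pointer run scanner: jump over each maximal consonant run, score it whole.
--     best = 0
--     i, n = 0, len(s)
--     while i < n:
--         if s[i] in 'aeiou':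
--             i += 1
--         else:
--             j = i
--             while j < n and s[j] not in 'aeiou':
--                 j += 1
--             best = max(best, sum(ord(c) - 96 for c in s[i:j]))
--             i = j
--     return best
-- ===== Notes on version B (the rewrite author's own statement) =====
-- stated objective: alternative
-- what changed: Replaced A's single interleaved (max_value, value) accumulator fold with a two-pointer scanner that locates each maximal consonant run, scores the whole run slice at once, and keeps only the best score.
import Mathlib
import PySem

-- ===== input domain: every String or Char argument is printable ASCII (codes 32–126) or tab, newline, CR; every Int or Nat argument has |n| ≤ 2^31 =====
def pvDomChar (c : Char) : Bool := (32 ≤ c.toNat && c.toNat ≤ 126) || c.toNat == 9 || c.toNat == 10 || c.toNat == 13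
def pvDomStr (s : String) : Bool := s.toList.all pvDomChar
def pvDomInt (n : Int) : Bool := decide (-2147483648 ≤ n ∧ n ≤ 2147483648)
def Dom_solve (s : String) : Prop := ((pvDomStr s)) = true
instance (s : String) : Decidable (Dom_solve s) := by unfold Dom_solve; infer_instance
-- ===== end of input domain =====

-- B scans each maximal consonant run with two pointers and scores the run slice whole,
-- instead of A's interleaved (max_value, value) accumulator; same cost, different structure.

-- ===== PORT A =====
-- A: one fold carrying (max_value, value); consonants add ord(c)-96 to value, a vowel folds value into max_value.
def solve (s : String) : Int :=
  let st := s.toList.foldl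
    (fun (st : Int × Int) (i : Char) =>
      if ¬ (i ∈ (['a', 'e', 'i', 'o', 'u'] : List Char)) then
        (st.1, st.2 + ((i.toNat : Int) - 96))
      else
        (max st.2 st.1, 0))
    (0, 0)
  max st.2 st.1

-- ===== PORT B =====
def pvIsVowelB (c : Char) : Bool := c ∈ (['a', 'e', 'i', 'o', 'u'] : List Char)

-- inner while loop of Source B: advance j while s[j] is a consonant
def scanRunB (l : List Char) (j : Nat) : Nat :=
  if h : j < l.length then
    if !(pvIsVowelB l[j]) then scanRunB l (j + 1) else j
  else j
termination_by l.length - j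

-- termination fact for the outer loop: the inner scan makes strict progress on a consonant
theorem scanRunB_progress (l : List Char) (j : Nat) (h : j < l.length)
    (hc : pvIsVowelB l[j] = false) : j < scanRunB l j := by
  unfold scanRunB
  rw [dif_pos h, hc]
  simp only [Bool.not_false, if_pos]
  have : ∀ (k : Nat), k ≤ scanRunB l k := by
    intro k
    fun_induction scanRunB l k with
    | case1 k h hc ih => omega
    | case2 k h hc => omega
    | case3 k h => omega
  have := this (j + 1)
  omega

-- outer while loop of Source B: state (i, best)
def outerB (l : List Char) (i : Nat) (best : Int) : Int :=
  if h : i < l.length then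
    if pvIsVowelB l[i] then outerB l (i + 1) best
    else
      let j := scanRunB l i
      outerB l j
        (max best (((PySem.List.slice l (some (i : Int)) (some (j : Int))).map
          (fun c => (c.toNat : Int) - 96)).sum))
  else best
termination_by l.length - i
decreasing_by
  · omega
  · have := scanRunB_progress l i h (by simp_all)
    omega

def solve_alt (s : String) : Int := outerB s.toList 0 0

-- ===== PRECONDITION & SPEC =====
def Spec_solve (s : String) (out : Int) : Prop := out = solve_alt s
instance (s : String) (out : Int) : Decidable (Spec_solve s out) := by unfold Spec_solve; infer_instance

-- ===== CLAIM (what is proved, stated in full; the proofs are below) =====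
def Claim_equal_solve : Prop := ∀ (s : String), Dom_solve s → Spec_solve s (solve s)

-- ===== LEMMAS AND PROOFS =====

-- "max over consonant runs, with v the value of the current partial run"
def runMax (v : Int) : List Char → Int
  | [] => v
  | c :: t => if pvIsVowelB c then max v (runMax 0 t) else runMax (v + ((c.toNat : Int) - 96)) t

theorem runMax_cons_vowel (c : Char) (t : List Char) (v : Int) (hv : pvIsVowelB c = true) :
    runMax v (c :: t) = max v (runMax 0 t) := by simp [runMax, hv]

theorem runMax_cons_cons (c : Char) (t : List Char) (v : Int) (hv : pvIsVowelB c = false) :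
    runMax v (c :: t) = runMax (v + ((c.toNat : Int) - 96)) t := by simp [runMax, hv]

theorem dropWhile_head_false {α : Type} (p : α → Bool) (l : List α) (c : α) (t : List α)
    (h : l.dropWhile p = c :: t) : p c = false := by
  induction l with
  | nil => simp at h
  | cons a s ih =>
    by_cases ha : p a = true
    · rw [List.dropWhile_cons_of_pos ha] at h
      exact ih h
    · rw [List.dropWhile_cons_of_neg ha] at h
      cases h
      simpa using ha

theorem scanRunB_eq (l : List Char) (j : Nat) :
    scanRunB l j = j + ((l.drop j).takeWhile (fun c => !pvIsVowelB c)).length := by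
  fun_induction scanRunB l j with
  | case1 j h hc ih =>
    rw [List.drop_eq_getElem_cons h]
    rw [List.takeWhile_cons_of_pos (by simpa using hc)]
    simp only [List.length_cons]
    omega
  | case2 j h hc =>
    rw [List.drop_eq_getElem_cons h]
    rw [List.takeWhile_cons_of_neg (by simpa using hc)]
    simp
  | case3 j h =>
    rw [List.drop_eq_nil_of_le (by omega)]
    simp

theorem take_len_takeWhile {α : Type} (p : α → Bool) (l : List α) :
    l.take (l.takeWhile p).length = l.takeWhile p := by
  induction l with
  | nil => simp
  | cons c t ih =>
    by_cases hc : p c = true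
    · rw [List.takeWhile_cons_of_pos hc]; simp [ih]
    · rw [List.takeWhile_cons_of_neg (by simpa using hc)]; simp

theorem drop_len_takeWhile {α : Type} (p : α → Bool) (l : List α) :
    l.drop (l.takeWhile p).length = l.dropWhile p := by
  induction l with
  | nil => simp
  | cons c t ih =>
    by_cases hc : p c = true
    · rw [List.takeWhile_cons_of_pos hc, List.dropWhile_cons_of_pos hc]; simpa using ih
    · rw [List.takeWhile_cons_of_neg (by simpa using hc),
          List.dropWhile_cons_of_neg (by simpa using hc)]; simp

theorem runMax_consume (l : List Char) (v : Int) :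
    runMax v l =
      runMax (v + ((l.takeWhile (fun c => !pvIsVowelB c)).map
        (fun c => (c.toNat : Int) - 96)).sum) (l.dropWhile (fun c => !pvIsVowelB c)) := by
  induction l generalizing v with
  | nil => simp [runMax]
  | cons c t ih =>
    by_cases hc : pvIsVowelB c = true
    · rw [List.takeWhile_cons_of_neg (by simp [hc]),
          List.dropWhile_cons_of_neg (by simp [hc])]
      simp
    · have hv : pvIsVowelB c = false := by simpa using hc
      rw [List.takeWhile_cons_of_pos (by simp [hv]), List.dropWhile_cons_of_pos (by simp [hv])]
      rw [runMax_cons_cons c t v hv, ih (v + ((c.toNat : Int) - 96))]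
      simp only [List.map_cons, List.sum_cons]
      congr 1
      ring

-- B computes max best (runMax 0 (l.drop i)) for nonnegative best
theorem outerB_eq (l : List Char) (i : Nat) (best : Int) :
    0 ≤ best → outerB l i best = max best (runMax 0 (l.drop i)) := by
  fun_induction outerB l i best with
  | case1 i best h hv ih =>
    intro hb
    rw [ih hb]
    rw [List.drop_eq_getElem_cons h]
    rw [runMax_cons_vowel _ _ _ hv]
    omega
  | case2 i best h hv j ih =>
    intro hb
    set p : Char → Bool := fun c => !pvIsVowelB c with hp
    have hjdef : j = scanRunB l i := rfl
    rw [hjdef] at ih ⊢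
    have hj : scanRunB l i = i + ((l.drop i).takeWhile p).length := scanRunB_eq l i
    have hslice : PySem.List.slice l (some (i : Int)) (some ((scanRunB l i : Nat) : Int))
        = (l.drop i).takeWhile p := by
      rw [PySem.List.slice_natCast, hj]
      have : i + ((l.drop i).takeWhile p).length - i = ((l.drop i).takeWhile p).length := by omega
      rw [this, take_len_takeWhile]
    have hdropj : l.drop (scanRunB l i) = (l.drop i).dropWhile p := by
      rw [hj, ← List.drop_drop, drop_len_takeWhile]
    set S : Int := (((l.drop i).takeWhile p).map (fun c => (c.toNat : Int) - 96)).sum with hS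
    have hR : runMax 0 (l.drop i) = runMax S ((l.drop i).dropWhile p) := by
      have := runMax_consume (l.drop i) 0
      simpa [hS] using this
    rw [hslice] at ih ⊢
    rw [ih (by omega)]
    rw [hdropj, hR]
    rcases hd : (l.drop i).dropWhile p with _ | ⟨c, t⟩
    · simp only [runMax]; omega
    · have hvc : pvIsVowelB c = true := by
        have := dropWhile_head_false p (l.drop i) c t hd
        simpa [hp] using this
      rw [runMax_cons_vowel c t _ hvc, runMax_cons_vowel c t _ hvc]
      generalize runMax 0 t = X
      omega
  | case3 i best h =>
    intro hb
    rw [List.drop_eq_nil_of_le (by omega)]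
    simp only [runMax]
    omega

-- A computes max mv (runMax v l) from state (mv, v)
theorem foldA_eq (l : List Char) (mv v : Int) :
    (let st := l.foldl
      (fun (st : Int × Int) (i : Char) =>
        if ¬ (i ∈ (['a', 'e', 'i', 'o', 'u'] : List Char)) then
          (st.1, st.2 + ((i.toNat : Int) - 96))
        else
          (max st.2 st.1, 0)) (mv, v)
     max st.2 st.1) = max mv (runMax v l) := by
  induction l generalizing mv v with
  | nil => simp [runMax, max_comm]
  | cons c t ih =>
    simp only [List.foldl_cons]
    by_cases hc : c ∈ (['a', 'e', 'i', 'o', 'u'] : List Char)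
    · rw [if_neg (not_not_intro hc)]
      rw [ih, runMax_cons_vowel c t v (by simp [pvIsVowelB, hc])]
      generalize runMax 0 t = X
      omega
    · rw [if_pos hc]
      rw [ih, runMax_cons_cons c t v (by simp [pvIsVowelB]; simpa using hc)]

-- ===== VERDICT (by name: the statement is the Claim_ definition above) =====
theorem solve_spec : Claim_equal_solve := by
  intro s _
  unfold Spec_solve solve solve_alt
  rw [outerB_eq s.toList 0 0 le_rfl]
  rw [foldA_eq s.toList 0 0]
  simp
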